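-- pv_equiv track=rewrite | github.com/thehalleyyoung/deppy | new_src/proposals/g15_impl_detail.py | gf2_kernel
-- ===== SOURCE A (Python) =====
-- from typing import (
--     Any, Dict, FrozenSet, List, Optional, Set, Tuple,
-- )
--
-- def gf2_kernel(matrix: List[List[int]]) -> List[List[int]]:
--     """Compute a basis for the kernel of a GF(2) matrix.
--
--     Returns a list of vectors (rows) that span ker(M).
--     """
--     if not matrix or not matrix[0]:
--         return []
--     rows_n = len(matrix)
--     cols_n = len(matrix[0])
--     aug = [row[:] + [1 if i == j else 0 for j in range(cols_n)]
--            for i, row in enumerate(matrix)]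
--
--     m = [r[:] for r in aug]
--     rows_count = len(m)
--     cols_total = len(m[0]) if m else 0
--
--     rank = 0
--     pivot_cols: List[int] = []
--     for col in range(cols_n):
--         pivot_row = None
--         for row in range(rank, rows_count):
--             if m[row][col] == 1:
--                 pivot_row = row
--                 break
--         if pivot_row is None:
--             continue
--         m[rank], m[pivot_row] = m[pivot_row], m[rank]
--         for row in range(rows_count):
--             if row != rank and m[row][col] == 1:
--                 m[row] = [(m[row][j] + m[rank][j]) % 2 for j in range(cols_total)]
--         pivot_cols.append(col)
--         rank += 1
--
--     free_cols = [c for c in range(cols_n) if c not in pivot_cols]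
--     kernel_basis: List[List[int]] = []
--     for fc in free_cols:
--         vec = [0] * cols_n
--         vec[fc] = 1
--         for i, pc in enumerate(pivot_cols):
--             if i < len(m):
--                 vec[pc] = m[i][fc]
--         kernel_basis.append(vec)
--     return kernel_basis
-- ===== SOURCE B (Python) =====
-- # B: forward elimination to row echelon form only (rows below the pivot are
-- # reduced, no identity augmentation), then a separate back-substitution pass
-- # that reduces each echelon row by the later echelon rows, and kernel vectors
-- # assembled directly from the reduced rows.
-- from typing import List
--
--
-- def gf2_kernel(matrix: List[List[int]]) -> List[List[int]]:
--     """Compute a basis for the kernel of a GF(2) matrix."""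
--     if not matrix or not matrix[0]:
--         return []
--     n = len(matrix[0])
--     rest = [row[:] for row in matrix]
--     pivots: List = []              # (pivot_col, echelon row), in discovery order
--     for col in range(n):
--         k = next((i for i, r in enumerate(rest) if r[col] == 1), None)
--         if k is None:
--             continue
--         rest[0], rest[k] = rest[k], rest[0]
--         piv = rest.pop(0)
--         rest = [[(x + y) % 2 for x, y in zip(r, piv)] if r[col] == 1 else r
--                 for r in rest]
--         pivots.append((col, piv))
--     reduced: List = []             # back-substitution: clear later pivot columns
--     for i, (pc, row) in enumerate(pivots):
--         cur = row
--         for qc, qrow in pivots[i + 1:]: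
--             if cur[qc] == 1:
--                 cur = [(x + y) % 2 for x, y in zip(cur, qrow)]
--         reduced.append((pc, cur))
--     pivot_cols = {pc for pc, _ in pivots}
--     basis: List[List[int]] = []
--     for fc in range(n):
--         if fc in pivot_cols:
--             continue
--         vec = [0] * n
--         vec[fc] = 1
--         for pc, cur in reversed(reduced):
--             vec[pc] = cur[fc]
--         basis.append(vec)
--     return basis
-- ===== Notes on version B (the rewrite author's own statement) =====
-- stated objective: alternative
-- what changed: A builds an identity-augmented matrix and runs one in-place Gauss-Jordan pass that eliminates above and below each pivot as it scans the columns, then reads kernel entries out of the resulting matrix by index; B drops the augmentation and splits the work into two phases - a forward pass to row echelon form (eliminating below only, recording (pivot_col, echelon_row) pairs on a shrinking rest list) and a back-substitution pass that reduces each echelon row by the later echelon rows - and assembles each kernel vector directly from the reduced rows in reverse pivot order.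
-- outside the precondition, e.g. on gf2_kernel([[1, 0], [0]]): A returns [[0, 1]], B raises IndexError
import Mathlib
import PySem

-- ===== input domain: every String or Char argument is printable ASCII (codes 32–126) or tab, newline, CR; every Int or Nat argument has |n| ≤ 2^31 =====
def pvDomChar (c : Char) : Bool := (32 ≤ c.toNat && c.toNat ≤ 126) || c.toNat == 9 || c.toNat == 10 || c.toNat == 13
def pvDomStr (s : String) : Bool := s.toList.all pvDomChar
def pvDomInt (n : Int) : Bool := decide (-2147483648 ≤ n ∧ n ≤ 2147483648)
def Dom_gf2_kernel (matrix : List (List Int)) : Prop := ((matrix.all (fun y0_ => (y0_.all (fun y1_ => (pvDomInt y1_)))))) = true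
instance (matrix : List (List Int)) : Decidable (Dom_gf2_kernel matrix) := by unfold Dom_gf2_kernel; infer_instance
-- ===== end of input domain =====

-- A does identity-augmented full Gauss-Jordan elimination to reduced row echelon
-- form and reads kernel entries out of the RREF matrix; B does forward elimination
-- only (rows below the pivot) to a row echelon form without augmentation and
-- recovers each pivot variable by back-substitution over the pivots in reverse.

-- ===== PORT A =====
def gf2_augRow (cols_n : Int) (p : Int × List Int) : List Int :=
  p.2 ++ (PySem.List.pyRange 0 cols_n 1).map (fun j => if p.1 = j then (1 : Int) else 0)

def gf2_elimRowA (colsTotal : Int) (ri rk : List Int) : List Int :=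
  (PySem.List.pyRange 0 colsTotal 1).map (fun j =>
    PySem.Int.mod (PySem.List.pyGetD ri j 0 + PySem.List.pyGetD rk j 0) 2)

def gf2_stepA (rowsCount colsTotal : Int)
    (st : List (List Int) × Int × List Int) (col : Int) :
    List (List Int) × Int × List Int :=
  match (PySem.List.pyRange st.2.1 rowsCount 1).find?
      (fun row => PySem.List.pyGetD (PySem.List.pyGetD st.1 row []) col 0 == 1) with
  | none => st
  | some pivotRow =>
    let m1 := PySem.List.pySetD
        (PySem.List.pySetD st.1 st.2.1 (PySem.List.pyGetD st.1 pivotRow []))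
        pivotRow (PySem.List.pyGetD st.1 st.2.1 [])
    let m2 := (PySem.List.pyRange 0 rowsCount 1).foldl (fun mm row =>
        if row ≠ st.2.1 ∧ PySem.List.pyGetD (PySem.List.pyGetD mm row []) col 0 = 1 then
          PySem.List.pySetD mm row
            (gf2_elimRowA colsTotal (PySem.List.pyGetD mm row [])
              (PySem.List.pyGetD mm st.2.1 []))
        else mm) m1
    (m2, st.2.1 + 1, st.2.2 ++ [col])

def gf2_vecA (m : List (List Int)) (cols_n : Nat) (pcs : List Int) (fc : Int) : List Int :=
  (PySem.List.enumerate pcs).foldl (fun v p =>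
      if p.1 < PySem.List.len m then
        PySem.List.pySetD v p.2 (PySem.List.pyGetD (PySem.List.pyGetD m p.1 []) fc 0)
      else v)
    (PySem.List.pySetD (List.replicate cols_n (0 : Int)) fc 1)

def gf2_kernel (matrix : List (List Int)) : List (List Int) :=
  if matrix = [] ∨ matrix.headD [] = [] then [] else
  let cols_n := (matrix.headD []).length
  let m0 := (PySem.List.enumerate matrix).map (gf2_augRow (cols_n : Int))
  let rowsCount : Int := PySem.List.len m0
  let colsTotal : Int := if m0 = [] then 0 else PySem.List.len (m0.headD [])
  let res := (PySem.List.pyRange 0 (cols_n : Int) 1).foldl (gf2_stepA rowsCount colsTotal) (m0, 0, [])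
  let freeCols := (PySem.List.pyRange 0 (cols_n : Int) 1).filter (fun c => !(res.2.2.contains c))
  freeCols.foldl (fun acc fc => acc ++ [gf2_vecA res.1 cols_n res.2.2 fc]) []

-- ===== PORT B =====
def gf2_xorB (a b : List Int) : List Int :=
  (a.zip b).map (fun p => PySem.Int.mod (p.1 + p.2) 2)

def gf2_stepB (st : List (Int × List Int) × List (List Int)) (col : Int) :
    List (Int × List Int) × List (List Int) :=
  match (PySem.List.enumerate st.2).find? (fun p => PySem.List.pyGetD p.2 col 0 == 1) with
  | none => st
  | some q =>
    let rest1 := PySem.List.pySetD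
        (PySem.List.pySetD st.2 0 (PySem.List.pyGetD st.2 q.1 []))
        q.1 (PySem.List.pyGetD st.2 0 [])
    let pr := (PySem.List.pop? rest1 0).getD ([], [])  -- rest.pop(0); rest1 ≠ [] here
    (st.1 ++ [(col, pr.1)],
     pr.2.map (fun r => if PySem.List.pyGetD r col 0 = 1 then gf2_xorB r pr.1 else r))

-- back-substitution row reduction: 'for qc, qrow in pivots[i+1:]: if cur[qc] == 1: cur = xor'
def gf2_redE (cur : List Int) (l : List (Int × List Int)) : List Int :=
  l.foldl (fun cur q =>
    if PySem.List.pyGetD cur q.1 0 = 1 then gf2_xorB cur q.2 else cur) cur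

def gf2_reduceB (pivots : List (Int × List Int)) : List (Int × List Int) :=
  (PySem.List.enumerate pivots).foldl (fun acc p =>
    acc ++ [(p.2.1, gf2_redE p.2.2 (PySem.List.slice pivots (some (p.1 + 1)) none))]) []

def gf2_vecB (cols_n : Nat) (reduced : List (Int × List Int)) (fc : Int) : List Int :=
  reduced.reverse.foldl (fun vec q => PySem.List.pySetD vec q.1 (PySem.List.pyGetD q.2 fc 0))
    (PySem.List.pySetD (List.replicate cols_n (0 : Int)) fc 1)

def gf2_kernel_alt (matrix : List (List Int)) : List (List Int) :=
  if matrix = [] ∨ matrix.headD [] = [] then [] else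
  let n := (matrix.headD []).length
  let pivots := ((PySem.List.pyRange 0 (n : Int) 1).foldl gf2_stepB ([], matrix)).1
  let reduced := gf2_reduceB pivots
  let pivotCols := PySem.Set.ofList (pivots.map Prod.fst)
  (PySem.List.pyRange 0 (n : Int) 1).foldl (fun acc fc =>
    if PySem.Set.contains pivotCols fc then acc else acc ++ [gf2_vecB n reduced fc]) []

-- ===== PRECONDITION & SPEC =====
-- Pre_ excludes matrices with a row SHORTER than the first row: there A usually
-- raises IndexError, and where it still returns, the value (short rows silently
-- skipped or padded by the augmentation arithmetic) is an accident of A's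
-- implementation on which B's elimination raises IndexError instead.
def Pre_gf2_kernel (matrix : List (List Int)) : Prop :=
  ∀ row ∈ matrix, (matrix.headD []).length ≤ row.length
instance (matrix : List (List Int)) : Decidable (Pre_gf2_kernel matrix) := by
  unfold Pre_gf2_kernel; infer_instance

def pvWitness_gf2_kernel : List (List Int) := [[1, 1, 0], [0, 1, 1]]

def Spec_gf2_kernel (matrix : List (List Int)) (out : List (List Int)) : Prop := out = gf2_kernel_alt matrix
instance (matrix : List (List Int)) (out : List (List Int)) : Decidable (Spec_gf2_kernel matrix out) := by unfold Spec_gf2_kernel; infer_instance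

-- ===== CLAIM (what is proved, stated in full; the proofs are below) =====
def Claim_equal_gf2_kernel : Prop := ∀ (matrix : List (List Int)), Dom_gf2_kernel matrix → Pre_gf2_kernel matrix → Spec_gf2_kernel matrix (gf2_kernel matrix)

-- ===== LEMMAS AND PROOFS =====

-- cur reduced by the rows of l, in order, whenever cur currently carries a 1
-- in that row's pivot column (exactly A's upward elimination, which always adds
-- the RAW echelon row of the later pivot)
-- (gf2_redE is the B-port helper defined above; used in the invariant below)

-- each of A's current top rows = its echelon row reduced by the later echelon rows
def gf2_Rel : List (Int × List Int) → List (List Int) → Prop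
  | [], [] => True
  | q :: ps, mr :: ms => mr = gf2_redE q.2 ps ∧ gf2_Rel ps ms
  | _, _ => False

-- the simulation invariant after the columns < a are done
structure gf2_Inv (n rows : Nat) (a : Int) (m : List (List Int)) (rank : Int)
    (pcs : List Int) (pivots : List (Int × List Int)) (rest : List (List Int)) : Prop where
  hlen : m.length = rows
  hw : ∀ r ∈ m, 2 * n ≤ r.length
  hrank : rank = (pivots.length : Int)
  hpcs : pcs = pivots.map Prod.fst
  hcount : pivots.length + rest.length = rows
  hrest : (m.drop pivots.length).map (fun r => r.take n) = rest.map (fun r => r.take n)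
  hsort : (pivots.map Prod.fst).Pairwise (· < ·)
  hbound : ∀ c ∈ pivots.map Prod.fst, 0 ≤ c ∧ c < a
  hpiv : ∀ q ∈ pivots, n ≤ q.2.length
  hrw : ∀ r ∈ rest, n ≤ r.length
  hrel : gf2_Rel (pivots.map (fun q => (q.1, q.2.take n)))
      ((m.take pivots.length).map (fun r => r.take n))

lemma gf2_xorB_length (a b : List Int) : (gf2_xorB a b).length = min a.length b.length := by
  simp [gf2_xorB]

lemma gf2_map_mapIdx {α β : Type} (l : List α) (g : α → β) (F : Nat → α → α) (G : Nat → β → β)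
    (h : ∀ (i : Nat) (hi : i < l.length), g (F i l[i]) = G i (g l[i])) :
    (l.mapIdx F).map g = (l.map g).mapIdx G := by
  apply List.ext_getElem (by simp)
  intro j h1 h2
  have hj : j < l.length := by simpa using h1
  simp only [List.getElem_map, List.getElem_mapIdx]
  exact h j hj

lemma gf2_mapIdx_split {β : Type} (Q1 Q2 : List β) (x : β) (G : Nat → β → β) (H : β → β)
    (hG : ∀ (i : Nat) (q : β), i ≠ Q1.length → G i q = H q) (hGx : G Q1.length x = x) :
    (Q1 ++ x :: Q2).mapIdx G = Q1.map H ++ x :: Q2.map H := by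
  apply List.ext_getElem (by simp)
  intro j h1 h2
  have hj : j < Q1.length + (Q2.length + 1) := by simpa [Nat.add_comm, Nat.add_left_comm] using h1
  simp only [List.getElem_mapIdx]
  rcases lt_trichotomy j Q1.length with hlt | heq | hgt
  · rw [List.getElem_append_left hlt,
      List.getElem_append_left (show j < (Q1.map H).length by simpa using hlt),
      List.getElem_map]
    exact hG j _ (by omega)
  · subst heq
    rw [List.getElem_append_right (le_refl _),
      List.getElem_append_right (show (Q1.map H).length ≤ Q1.length by simp)]
    simp only [Nat.sub_self, List.length_map, List.getElem_cons_zero]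
    exact hGx
  · rw [List.getElem_append_right (by omega),
      List.getElem_append_right (show (Q1.map H).length ≤ j by simpa using hgt.le)]
    obtain ⟨k, hk⟩ : ∃ k, j - Q1.length = k + 1 := ⟨j - Q1.length - 1, by omega⟩
    simp only [List.length_map, hk, List.getElem_cons_succ, List.getElem_map]
    exact hG j _ (by omega)

lemma gf2_find_shift {α : Type} (p : Int → Bool) (q : α → Bool) :
    ∀ (xs : List α) (off s : Int),
    (∀ k : Nat, (hk : k < xs.length) → p (off + k) = q xs[k]) →
    (PySem.List.pyRange off (off + xs.length) 1).find? p
      = ((PySem.List.enumerate xs s).find? (fun pr => q pr.2)).map (fun pr => off - s + pr.1) := by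
  intro xs
  induction xs with
  | nil =>
    intro off s h
    simp [PySem.List.pyRange_one_eq_nil, PySem.List.enumerate_nil]
  | cons x xs ih =>
    intro off s h
    have hlt : off < off + ((x :: xs).length : Int) := by simp
    rw [PySem.List.pyRange_one_cons hlt]
    have hb : off + ((x :: xs).length : Int) = (off + 1) + (xs.length : Int) := by
      simp; ring
    rw [hb, PySem.List.enumerate_cons]
    simp only [List.find?_cons]
    have h0 : p off = q x := by
      have := h 0 (by simp)
      simpa using this
    rcases hq : q x with _ | _
    · rw [h0, hq]
      simp only
      rw [ih (off + 1) (s + 1) (by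
        intro k hk
        have := h (k + 1) (by simpa using hk)
        push_cast at this ⊢
        rw [show off + 1 + (k : Int) = off + ((k : Int) + 1) by ring]
        simpa using this)]
      cases hfind : (PySem.List.enumerate xs (s + 1)).find? (fun pr => q pr.2) with
      | none => simp
      | some pr => simp
    · rw [h0, hq]
      simp only [Option.map_some]
      congr 1
      ring

lemma gf2_elim_fold (rank a ct : Int) (hrank : 0 ≤ rank) (m : List (List Int)) :
    (PySem.List.pyRange 0 (m.length : Int) 1).foldl (fun mm row =>
        if row ≠ rank ∧ PySem.List.pyGetD (PySem.List.pyGetD mm row []) a 0 = 1 then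
          PySem.List.pySetD mm row
            (gf2_elimRowA ct (PySem.List.pyGetD mm row []) (PySem.List.pyGetD mm rank []))
        else mm) m
    = m.mapIdx (fun i r =>
        if (i : Int) ≠ rank ∧ PySem.List.pyGetD r a 0 = 1 then
          gf2_elimRowA ct r (PySem.List.pyGetD m rank []) else r) := by
  set P : Nat → List (List Int) := fun s => m.mapIdx (fun i r =>
      if (i : Int) < (s : Int) ∧ ((i : Int) ≠ rank ∧ PySem.List.pyGetD r a 0 = 1) then
        gf2_elimRowA ct r (PySem.List.pyGetD m rank []) else r) with hP
  have hPlen : ∀ s, (P s).length = m.length := by intro s; simp [hP]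
  have hrget : ∀ s, PySem.List.pyGetD (P s) rank [] = PySem.List.pyGetD m rank [] := by
    intro s
    rw [← Int.toNat_of_nonneg hrank, PySem.List.pyGetD_natCast, PySem.List.pyGetD_natCast]
    by_cases h : rank.toNat < m.length
    · rw [List.getD_eq_getElem _ _ (by simp [hP, h]), List.getD_eq_getElem _ _ h]
      simp only [hP, List.getElem_mapIdx]
      rw [if_neg (by omega)]
    · rw [List.getD_eq_default _ _ (by simp [hP]; omega), List.getD_eq_default _ _ (by omega)]
  have hsget : ∀ s, s < m.length → PySem.List.pyGetD (P s) (s : Int) [] = m.getD s [] := by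
    intro s hs
    rw [PySem.List.pyGetD_natCast, List.getD_eq_getElem _ _ (by simp [hP, hs]),
      List.getD_eq_getElem _ _ hs]
    simp only [hP, List.getElem_mapIdx]
    rw [if_neg (by omega)]
  have key : ∀ (k s : Nat), s + k = m.length →
      (PySem.List.pyRange (s : Int) (m.length : Int) 1).foldl (fun mm row =>
        if row ≠ rank ∧ PySem.List.pyGetD (PySem.List.pyGetD mm row []) a 0 = 1 then
          PySem.List.pySetD mm row
            (gf2_elimRowA ct (PySem.List.pyGetD mm row []) (PySem.List.pyGetD mm rank []))
        else mm) (P s) = P m.length := by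
    intro k
    induction k with
    | zero =>
      intro s hs
      rw [PySem.List.pyRange_one_eq_nil (by omega)]
      have : s = m.length := by omega
      rw [List.foldl_nil, this]
    | succ k ih =>
      intro s hs
      have hslt : s < m.length := by omega
      rw [PySem.List.pyRange_one_cons (by exact_mod_cast hslt), List.foldl_cons]
      have hbody : (if (s : Int) ≠ rank ∧ PySem.List.pyGetD (PySem.List.pyGetD (P s) (s : Int) []) a 0 = 1 then
          PySem.List.pySetD (P s) (s : Int)
            (gf2_elimRowA ct (PySem.List.pyGetD (P s) (s : Int) []) (PySem.List.pyGetD (P s) rank []))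
        else P s) = P (s + 1) := by
        rw [hsget s hslt, hrget s, List.getD_eq_getElem _ _ hslt]
        by_cases hc : (s : Int) ≠ rank ∧ PySem.List.pyGetD m[s] a 0 = 1
        · rw [if_pos hc, PySem.List.pySetD_natCast]
          apply List.ext_getElem (by simp [hP])
          intro j h1 h2
          have hjm : j < m.length := by simpa [hP] using h2
          rw [List.getElem_set]
          by_cases hj : s = j
          · subst hj
            simp only [hP, List.getElem_mapIdx]
            have hcond : ((s : Int) < ((s + 1 : Nat) : Int) ∧ ((s : Int) ≠ rank ∧ PySem.List.pyGetD m[s] a 0 = 1)) := ⟨by push_cast; omega, hc⟩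
            rw [if_pos hcond]
            simp
          · rw [if_neg hj]
            simp only [hP, List.getElem_mapIdx]
            by_cases hcj : (j : Int) ≠ rank ∧ PySem.List.pyGetD m[j] a 0 = 1
            · by_cases hjs : (j : Int) < (s : Int)
              · rw [if_pos ⟨hjs, hcj⟩, if_pos ⟨by push_cast at hjs ⊢; omega, hcj⟩]
              · have hjs' : ¬ ((j : Int) < ((s + 1 : Nat) : Int)) := by
                  have : (j : Int) ≠ (s : Int) := by
                    intro h; exact hj (by exact_mod_cast h.symm)
                  push_cast at hjs ⊢; omega
                rw [if_neg (by tauto), if_neg (by tauto)]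
            · rw [if_neg (by tauto), if_neg (by tauto)]
        · rw [if_neg hc]
          apply List.ext_getElem (by simp [hP])
          intro j h1 h2
          have hjm : j < m.length := by simpa [hP] using h1
          simp only [hP, List.getElem_mapIdx]
          by_cases hj : s = j
          · subst hj
            rw [if_neg (by omega), if_neg (by tauto)]
          · by_cases hcj : (j : Int) ≠ rank ∧ PySem.List.pyGetD m[j] a 0 = 1
            · by_cases hjs : (j : Int) < (s : Int)
              · rw [if_pos ⟨hjs, hcj⟩, if_pos ⟨by push_cast at hjs ⊢; omega, hcj⟩]
              · have : (j : Int) ≠ (s : Int) := by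
                  intro h; exact hj (by exact_mod_cast h.symm)
                rw [if_neg (by omega), if_neg (by omega)]
            · rw [if_neg (by tauto), if_neg (by tauto)]
      rw [hbody, show (s : Int) + 1 = ((s + 1 : Nat) : Int) by push_cast; ring]
      exact ih (s + 1) (by omega)
  have h0 : P 0 = m := by
    apply List.ext_getElem (by simp [hP])
    intro j h1 h2
    simp [hP, List.getElem_mapIdx]
  have hkey := key m.length 0 (by omega)
  rw [h0, show ((0 : Nat) : Int) = (0 : Int) by simp] at hkey
  rw [hkey]
  apply List.ext_getElem (by simp [hP])
  intro j h1 h2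
  have hjm : j < m.length := by simpa [hP] using h1
  simp only [hP, List.getElem_mapIdx]
  by_cases hc : (j : Int) ≠ rank ∧ PySem.List.pyGetD m[j] a 0 = 1
  · rw [if_pos ⟨by exact_mod_cast hjm, hc⟩, if_pos hc]
  · rw [if_neg (by tauto), if_neg hc]

lemma gf2_take_elimRow (n : Nat) (r p : List Int) (hr : 2 * n ≤ r.length) (hp : 2 * n ≤ p.length) :
    (gf2_elimRowA (2 * (n : Int)) r p).take n = gf2_xorB (r.take n) (p.take n) := by
  have hlr : (PySem.List.pyRange 0 (2 * (n : Int)) 1).length = 2 * n := by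
    rw [PySem.List.length_pyRange_one]; omega
  apply List.ext_getElem
  · simp only [gf2_elimRowA, gf2_xorB, List.length_take, List.length_map, List.length_zip, hlr]
    omega
  · intro j hj1 hj2
    have hjn : j < n := by
      simp only [gf2_elimRowA, List.length_take, List.length_map, hlr] at hj1
      omega
    have hj2n : j < 2 * n := by omega
    simp only [gf2_elimRowA, gf2_xorB, List.getElem_take, List.getElem_map, List.getElem_zip]
    rw [PySem.List.getElem_pyRange_one]
    have : (0 : Int) + ((j : Nat) : Int) = ((j : Nat) : Int) := by ring
    rw [this, PySem.List.pyGetD_natCast, PySem.List.pyGetD_natCast,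
      List.getD_eq_getElem _ _ (by omega), List.getD_eq_getElem _ _ (by omega)]

lemma gf2_take_xorB (n : Nat) (r p : List Int) (hr : n ≤ r.length) (hp : n ≤ p.length) :
    (gf2_xorB r p).take n = gf2_xorB (r.take n) (p.take n) := by
  apply List.ext_getElem
  · simp only [gf2_xorB, List.length_take, List.length_map, List.length_zip]
    omega
  · intro j hj1 hj2
    have hjn : j < n := by
      simp only [gf2_xorB, List.length_take, List.length_map, List.length_zip] at hj1
      omega
    simp only [gf2_xorB, List.getElem_take, List.getElem_map, List.getElem_zip]

lemma gf2_bit_take (n : Nat) (a : Int) (h0 : 0 ≤ a) (han : a < (n : Int)) (r : List Int)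
    (hr : n ≤ r.length) :
    PySem.List.pyGetD r a 0 = PySem.List.pyGetD (r.take n) a 0 := by
  rw [← Int.toNat_of_nonneg h0, PySem.List.pyGetD_natCast, PySem.List.pyGetD_natCast]
  have h1 : a.toNat < r.length := by omega
  have h2 : a.toNat < (r.take n).length := by simp; omega
  rw [List.getD_eq_getElem _ _ h1, List.getD_eq_getElem _ _ h2, List.getElem_take]

lemma gf2_elimRowA_length (n : Nat) (r p : List Int) :
    (gf2_elimRowA (2 * (n : Int)) r p).length = 2 * n := by
  simp only [gf2_elimRowA, List.length_map, PySem.List.length_pyRange_one]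
  omega


lemma gf2_Rel_step (a : Int) (P : List Int) :
    ∀ (ps : List (Int × List Int)) (ms : List (List Int)),
    gf2_Rel ps ms →
    gf2_Rel (ps ++ [(a, P)])
      ((ms.map (fun mr => if PySem.List.pyGetD mr a 0 = 1 then gf2_xorB mr P else mr)) ++ [P]) := by
  intro ps
  induction ps with
  | nil =>
    intro ms h
    cases ms with
    | nil => exact ⟨rfl, trivial⟩
    | cons x xs => exact absurd h (by simp [gf2_Rel])
  | cons q pt ih =>
    intro ms h
    cases ms with
    | nil => exact absurd h (by simp [gf2_Rel])
    | cons mr mt =>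
      obtain ⟨hhead, htail⟩ := h
      refine ⟨?_, ih mt htail⟩
      show (if PySem.List.pyGetD mr a 0 = 1 then gf2_xorB mr P else mr)
          = gf2_redE q.2 (pt ++ [(a, P)])
      conv_rhs => rw [gf2_redE]
      rw [List.foldl_append,
        show List.foldl (fun cur q => if PySem.List.pyGetD cur q.1 0 = 1 then gf2_xorB cur q.2 else cur) q.2 pt
          = gf2_redE q.2 pt from rfl, ← hhead]
      rfl

lemma gf2_step_inv (n rows : Nat) (a : Int) (h0 : 0 ≤ a) (han : a < (n : Int))
    (stA : List (List Int) × Int × List Int) (stB : List (Int × List Int) × List (List Int))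
    (hI : gf2_Inv n rows a stA.1 stA.2.1 stA.2.2 stB.1 stB.2) :
    gf2_Inv n rows (a + 1)
      (gf2_stepA ((rows : Nat) : Int) (2 * (n : Int)) stA a).1
      (gf2_stepA ((rows : Nat) : Int) (2 * (n : Int)) stA a).2.1
      (gf2_stepA ((rows : Nat) : Int) (2 * (n : Int)) stA a).2.2
      (gf2_stepB stB a).1 (gf2_stepB stB a).2 := by
  obtain ⟨m, rank, pcs⟩ := stA
  obtain ⟨pivots, rest⟩ := stB
  obtain ⟨h1, h2, h3, h4, hC, h5, h6, h7, h8, h9, hR⟩ := hI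
  simp only at h1 h2 h3 h4 hC h5 h6 h7 h8 h9 hR
  subst h3; subst h4
  have hml : m.length = pivots.length + rest.length := by omega
  have hrankle : pivots.length ≤ m.length := by omega
  set mtopT := (m.take pivots.length).map (fun r => r.take n) with hmtopT
  have hmtopTlen : mtopT.length = pivots.length := by
    simp only [hmtopT, List.length_map, List.length_take]; omega
  have hfull : m.map (fun r => r.take n) = mtopT ++ rest.map (fun r => r.take n) := by
    conv_lhs => rw [← List.take_append_drop pivots.length m]
    rw [List.map_append, h5]
  have htakeGen : ∀ (k : Nat), (hk : k < rest.length) →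
      (m[pivots.length + k]'(by omega)).take n = rest[k].take n := by
    intro k hk
    have hlen2 : k < ((m.drop pivots.length).map (fun r => r.take n)).length := by
      simp only [List.length_map, List.length_drop]; omega
    have hgm := List.getElem_of_eq h5 hlen2
    simp only [List.getElem_map, List.getElem_drop] at hgm
    simpa using hgm
  have hpred : ∀ (k : Nat), (hk : k < rest.length) →
      ((fun row => PySem.List.pyGetD (PySem.List.pyGetD m row []) a 0 == 1)
        ((pivots.length : Int) + (k : Int)))
        = ((fun r => PySem.List.pyGetD r a 0 == 1) rest[k]) := by
    intro k hk
    simp only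
    have hik : pivots.length + k < m.length := by omega
    rw [show (pivots.length : Int) + (k : Int) = ((pivots.length + k : Nat) : Int) by push_cast; ring,
      PySem.List.pyGetD_natCast, List.getD_eq_getElem _ _ hik]
    have hlen2 : 2 * n ≤ m[pivots.length + k].length := h2 _ (List.getElem_mem _)
    rw [gf2_bit_take n a h0 han _ (by omega), htakeGen k hk,
      ← gf2_bit_take n a h0 han _ (h9 _ (List.getElem_mem hk))]
  have hfind := gf2_find_shift
      (p := fun row => PySem.List.pyGetD (PySem.List.pyGetD m row []) a 0 == 1)
      (q := fun r => PySem.List.pyGetD r a 0 == 1) rest (pivots.length : Int) 0 hpred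
  rw [show (pivots.length : Int) + ((rest.length : Nat) : Int) = ((rows : Nat) : Int) by
    exact_mod_cast congrArg (Nat.cast : Nat → Int) hC] at hfind
  cases hq : (PySem.List.enumerate rest 0).find? (fun pr => PySem.List.pyGetD pr.2 a 0 == 1) with
  | none =>
    rw [hq] at hfind
    simp only [Option.map_none] at hfind
    simp only [gf2_stepA, gf2_stepB, hfind, hq]
    exact ⟨h1, h2, rfl, rfl, hC, h5, h6,
      (by intro c hc; have := h7 c hc; omega), h8, h9, hR⟩
  | some q =>
    obtain ⟨k, hk, hqe⟩ := (PySem.List.mem_enumerate_iff rest 0 q).mp (List.mem_of_find?_eq_some hq)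
    subst hqe
    rw [hq] at hfind
    simp only [Option.map_some] at hfind
    have hPm : pivots.length < m.length := by omega
    have hPkm : pivots.length + k < m.length := by omega
    have h0r : 0 < rest.length := by omega
    have hgA1 : PySem.List.pyGetD m ((pivots.length : Int) - 0 + (0 + (k : Int))) []
        = m[pivots.length + k] := by
      rw [show (pivots.length : Int) - 0 + (0 + (k : Int)) = ((pivots.length + k : Nat) : Int) by push_cast; ring,
        PySem.List.pyGetD_natCast, List.getD_eq_getElem _ _ hPkm]
    have hgA0 : PySem.List.pyGetD m ((pivots.length : Nat) : Int) [] = m[pivots.length] := by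
      rw [PySem.List.pyGetD_natCast, List.getD_eq_getElem _ _ hPm]
    have hgB1 : PySem.List.pyGetD rest (0 + (k : Int)) [] = rest[k] := by
      rw [show (0 : Int) + (k : Int) = ((k : Nat) : Int) by ring,
        PySem.List.pyGetD_natCast, List.getD_eq_getElem _ _ hk]
    have hgB0 : PySem.List.pyGetD rest 0 [] = rest[0] := by
      rw [PySem.List.pyGetD_zero, List.getD_eq_getElem _ _ h0r]
    simp only [gf2_stepA, gf2_stepB, hfind, hq, hgA1, hgA0, hgB1, hgB0]
    rw [show ((pivots.length : Int) - 0 + (0 + (k : Int))) = ((pivots.length + k : Nat) : Int) by push_cast; ring]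
    rw [show (0 + (k : Int)) = ((k : Nat) : Int) by ring]
    have hset0 : ∀ (v : List Int), PySem.List.pySetD rest 0 v = rest.set 0 v := by
      intro v
      rw [show (0 : Int) = ((0 : Nat) : Int) from rfl, PySem.List.pySetD_natCast]
    simp only [PySem.List.pySetD_natCast, hset0]
    set m1 := (m.set pivots.length m[pivots.length + k]).set (pivots.length + k) m[pivots.length] with hm1
    set rest1 := (rest.set 0 rest[k]).set k rest[0] with hrest1
    have hm1len : m1.length = m.length := by simp [hm1]
    have hr1len : rest1.length = rest.length := by simp [hrest1]
    have hr1mem : ∀ r ∈ rest1, n ≤ r.length := by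
      intro r hr
      rcases List.mem_or_eq_of_mem_set hr with hr' | hr'
      · rcases List.mem_or_eq_of_mem_set hr' with hr'' | hr''
        · exact h9 _ hr''
        · rw [hr'']; exact h9 _ (List.getElem_mem _)
      · rw [hr']; exact h9 _ (List.getElem_mem _)
    obtain ⟨y, ys, hys⟩ := List.exists_cons_of_ne_nil
      (show rest1 ≠ [] by intro hh; rw [hh] at hr1len; simp at hr1len; omega)
    have hy : y = rest[k] := by
      have : rest1[0]'(by omega) = rest[k] := by
        simp only [hrest1, List.getElem_set]
        by_cases hk0 : k = 0
        · subst hk0; simp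
        · rw [if_neg hk0]; simp
      simp only [hys, List.getElem_cons_zero] at this
      exact this
    subst hy
    have hpop : (PySem.List.pop? rest1 0).getD ([], []) = (rest[k], ys) := by
      rw [hys, PySem.List.pop?_zero_cons]; rfl
    simp only [hpop]
    have hyslen : ys.length + 1 = rest.length := by
      have := hr1len
      rw [hys] at this
      simpa using this
    have hysmem : ∀ r ∈ ys, n ≤ r.length := by
      intro r hr
      exact hr1mem r (by rw [hys]; exact List.mem_cons_of_mem _ hr)
    have hm1mem : ∀ r ∈ m1, 2 * n ≤ r.length := by
      intro r hr
      rcases List.mem_or_eq_of_mem_set hr with hr' | hr'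
      · rcases List.mem_or_eq_of_mem_set hr' with hr'' | hr''
        · exact h2 _ hr''
        · rw [hr'']; exact h2 _ (List.getElem_mem _)
      · rw [hr']; exact h2 _ (List.getElem_mem _)
    have htakePK : m[pivots.length + k].take n = rest[k].take n := htakeGen k hk
    have htakeP0 : m[pivots.length].take n = rest[0].take n := by
      have := htakeGen 0 h0r
      simpa using this
    have hS : m1.map (fun r => r.take n)
        = mtopT ++ rest1.map (fun r => r.take n) := by
      rw [hm1, List.map_set, List.map_set, hfull, htakePK, htakeP0,
        List.set_append_right _ _ (by rw [hmtopTlen]),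
        List.set_append_right _ _ (by rw [hmtopTlen]; omega)]
      rw [hrest1]
      simp only [hmtopTlen, Nat.sub_self, List.map_set]
      congr 2
      omega
    rw [show ((rows : Nat) : Int) = (m1.length : Int) by rw [hm1len, h1]]
    rw [gf2_elim_fold ((pivots.length : Nat) : Int) a (2 * (n : Int)) (by positivity) m1]
    have hm1P : PySem.List.pyGetD m1 ((pivots.length : Nat) : Int) [] = m[pivots.length + k] := by
      rw [PySem.List.pyGetD_natCast, List.getD_eq_getElem _ _ (by omega)]
      simp only [hm1, List.getElem_set]
      by_cases hk0 : k = 0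
      · subst hk0; simp
      · rw [if_neg (by omega)]
        simp
    rw [hm1P]
    have hpivlen : 2 * n ≤ m[pivots.length + k].length := h2 _ (List.getElem_mem _)
    have hrklen : n ≤ rest[k].length := h9 _ (List.getElem_mem hk)
    have hmapIdx : (m1.mapIdx (fun i r =>
          if (i : Int) ≠ ((pivots.length : Nat) : Int) ∧ PySem.List.pyGetD r a 0 = 1 then
            gf2_elimRowA (2 * (n : Int)) r m[pivots.length + k] else r)).map (fun r => r.take n)
        = (m1.map (fun r => r.take n)).mapIdx (fun i q =>
          if (i : Int) ≠ ((pivots.length : Nat) : Int) ∧ PySem.List.pyGetD q a 0 = 1 then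
            gf2_xorB q (rest[k].take n) else q) := by
      apply gf2_map_mapIdx
      intro i hi
      have hlen : 2 * n ≤ m1[i].length := hm1mem _ (List.getElem_mem _)
      have hbit : PySem.List.pyGetD m1[i] a 0 = PySem.List.pyGetD (m1[i].take n) a 0 :=
        gf2_bit_take n a h0 han _ (by omega)
      by_cases hci : (i : Int) ≠ ((pivots.length : Nat) : Int) ∧ PySem.List.pyGetD (m1[i].take n) a 0 = 1
      · rw [if_pos ⟨hci.1, by rw [hbit]; exact hci.2⟩, if_pos hci,
          gf2_take_elimRow n _ _ hlen hpivlen, htakePK]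
      · rw [if_neg (by intro hcon; exact hci ⟨hcon.1, by rw [← hbit]; exact hcon.2⟩), if_neg hci]
    have hS2 : (m1.mapIdx (fun i r =>
          if (i : Int) ≠ ((pivots.length : Nat) : Int) ∧ PySem.List.pyGetD r a 0 = 1 then
            gf2_elimRowA (2 * (n : Int)) r m[pivots.length + k] else r)).map (fun r => r.take n)
        = mtopT.map (fun q => if PySem.List.pyGetD q a 0 = 1 then gf2_xorB q (rest[k].take n) else q)
          ++ rest[k].take n ::
            (ys.map (fun r => r.take n)).map (fun q => if PySem.List.pyGetD q a 0 = 1 then gf2_xorB q (rest[k].take n) else q) := by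
      rw [hmapIdx, hS, hys]
      simp only [List.map_cons]
      rw [gf2_mapIdx_split mtopT (ys.map (fun r => r.take n)) (rest[k].take n) _
          (fun q => if PySem.List.pyGetD q a 0 = 1 then gf2_xorB q (rest[k].take n) else q)
          (by
            intro i q hiP
            have hne : (i : Int) ≠ ((pivots.length : Nat) : Int) := by
              rw [hmtopTlen] at hiP
              exact_mod_cast fun hh => hiP (by exact_mod_cast hh)
            beta_reduce
            by_cases hb : PySem.List.pyGetD q a 0 = 1
            · rw [if_pos ⟨hne, hb⟩, if_pos hb]
            · rw [if_neg (by tauto), if_neg hb])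
          (by rw [hmtopTlen]; simp)]
    set H := fun q => if PySem.List.pyGetD q a 0 = 1 then gf2_xorB q (rest[k].take n) else q with hH
    set m2 := m1.mapIdx (fun i r =>
        if (i : Int) ≠ ((pivots.length : Nat) : Int) ∧ PySem.List.pyGetD r a 0 = 1 then
          gf2_elimRowA (2 * (n : Int)) r m[pivots.length + k] else r) with hm2
    have hm2len : m2.length = m.length := by simp [hm2, hm1len]
    have hHrest : (ys.map (fun r => if PySem.List.pyGetD r a 0 = 1 then gf2_xorB r rest[k] else r)).map (fun r => r.take n)
        = (ys.map (fun r => r.take n)).map H := by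
      rw [List.map_map, List.map_map]
      apply List.map_congr_left
      intro r hr
      simp only [Function.comp_apply, hH]
      have hrl : n ≤ r.length := hysmem _ hr
      by_cases hb : PySem.List.pyGetD r a 0 = 1
      · rw [if_pos hb, if_pos (by rw [← gf2_bit_take n a h0 han _ hrl]; exact hb),
          gf2_take_xorB n _ _ hrl hrklen]
      · rw [if_neg hb, if_neg (by rw [← gf2_bit_take n a h0 han _ hrl]; exact hb)]
    refine ⟨?_, ?_, ?_, ?_, ?_, ?_, ?_, ?_, ?_, ?_, ?_⟩
    · simpa [hm2len] using h1
    · intro r hr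
      rw [List.mem_iff_getElem] at hr
      obtain ⟨i, hi, hie⟩ := hr
      simp only [hm2, List.getElem_mapIdx] at hie
      rw [← hie]
      have hi' : i < m1.length := by simpa [hm2, hm1len] using hi
      by_cases hc : ((i : Int) ≠ ((pivots.length : Nat) : Int) ∧ PySem.List.pyGetD (m1[i]'hi') a 0 = 1)
      · rw [if_pos hc, gf2_elimRowA_length n _ _]
      · rw [if_neg hc]; exact hm1mem _ (List.getElem_mem _)
    · simp only [List.length_append, List.length_cons, List.length_nil]
      push_cast; ring
    · simp
    · simp only [List.length_append, List.length_map, List.length_cons, List.length_nil]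
      omega
    · rw [List.map_drop, hS2, hHrest,
        show (pivots ++ [(a, rest[k])]).length = (mtopT.map H ++ [rest[k].take n]).length by
          simp [hmtopTlen],
        show mtopT.map H ++ rest[k].take n :: (ys.map (fun r => r.take n)).map H
          = (mtopT.map H ++ [rest[k].take n]) ++ (ys.map (fun r => r.take n)).map H by simp,
        List.drop_left]
    · simp only [List.map_append, List.map_cons, List.map_nil]
      rw [List.pairwise_append]
      refine ⟨h6, by simp, ?_⟩
      intro x hx b hb
      simp only [List.mem_cons, List.not_mem_nil, or_false] at hb
      subst hb
      exact (h7 x hx).2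
    · intro c hc
      simp only [List.map_append, List.map_cons, List.map_nil, List.mem_append] at hc
      rcases hc with hc | hc
      · have := h7 c hc
        omega
      · simp at hc
        subst hc
        omega
    · intro q hq
      rcases List.mem_append.mp hq with hq' | hq'
      · exact h8 _ hq'
      · simp only [List.mem_cons, List.not_mem_nil, or_false] at hq'
        subst hq'
        exact hrklen
    · intro r hr
      obtain ⟨r0, hr0, rfl⟩ := List.mem_map.mp hr
      have hrl : n ≤ r0.length := hysmem _ hr0
      by_cases hb : PySem.List.pyGetD r0 a 0 = 1
      · rw [if_pos hb]
        simp only [gf2_xorB, List.length_map, List.length_zip]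
        omega
      · rw [if_neg hb]; exact hrl
    · -- hrel: each new top row = its echelon row reduced by the later echelon rows
      have htk : ((m2.take (pivots.length + 1)).map (fun r => r.take n))
          = mtopT.map H ++ [rest[k].take n] := by
        rw [List.map_take, hS2,
          show pivots.length + 1 = (mtopT.map H ++ [rest[k].take n]).length by simp [hmtopTlen]]
        rw [show mtopT.map H ++ rest[k].take n :: (ys.map (fun r => r.take n)).map H
            = (mtopT.map H ++ [rest[k].take n]) ++ (ys.map (fun r => r.take n)).map H by simp]
        rw [List.take_left]
      simp only [List.map_append, List.map_cons, List.map_nil]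
      rw [show (m2.take ((pivots ++ [(a, rest[k])]).length)).map (fun r => r.take n)
          = (m2.take (pivots.length + 1)).map (fun r => r.take n) by simp]
      rw [htk]
      have := gf2_Rel_step a (rest[k].take n)
        (pivots.map (fun q => (q.1, q.2.take n))) mtopT hR
      simpa [hH] using this

lemma gf2_fold_inv (n rows : Nat) :
    ∀ (k : Nat) (a : Int) (stA : List (List Int) × Int × List Int)
      (stB : List (Int × List Int) × List (List Int)),
    0 ≤ a → a + k = (n : Int) → gf2_Inv n rows a stA.1 stA.2.1 stA.2.2 stB.1 stB.2 →
    gf2_Inv n rows n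
      ((PySem.List.pyRange a (n : Int) 1).foldl (gf2_stepA ((rows : Nat) : Int) (2 * (n : Int))) stA).1
      ((PySem.List.pyRange a (n : Int) 1).foldl (gf2_stepA ((rows : Nat) : Int) (2 * (n : Int))) stA).2.1
      ((PySem.List.pyRange a (n : Int) 1).foldl (gf2_stepA ((rows : Nat) : Int) (2 * (n : Int))) stA).2.2
      ((PySem.List.pyRange a (n : Int) 1).foldl gf2_stepB stB).1
      ((PySem.List.pyRange a (n : Int) 1).foldl gf2_stepB stB).2 := by
  intro k
  induction k with
  | zero =>
    intro a stA stB h0 hk hI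
    rw [PySem.List.pyRange_one_eq_nil (by omega)]
    simp only [List.foldl_nil]
    rw [show a = ((n : Nat) : Int) by omega] at hI
    exact hI
  | succ k ih =>
    intro a stA stB h0 hk hI
    rw [PySem.List.pyRange_one_cons (by omega)]
    simp only [List.foldl_cons]
    exact ih (a + 1) _ _ (by omega) (by omega) (gf2_step_inv n rows a h0 (by omega) stA stB hI)

def gf2_setfold (fc : Int) (l : List (Int × List Int)) (v : List Int) : List Int :=
  l.foldl (fun v q => PySem.List.pySetD v q.1 (PySem.List.pyGetD q.2 fc 0)) v

lemma gf2_setfold_cons (fc : Int) (q : Int × List Int) (t : List (Int × List Int)) (v : List Int) :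
    gf2_setfold fc (q :: t) v
      = gf2_setfold fc t (PySem.List.pySetD v q.1 (PySem.List.pyGetD q.2 fc 0)) := rfl

lemma gf2_setD_comm (v : List Int) (i j x y : Int) (hi : 0 ≤ i) (hj : 0 ≤ j) (hne : i ≠ j) :
    PySem.List.pySetD (PySem.List.pySetD v i x) j y
      = PySem.List.pySetD (PySem.List.pySetD v j y) i x := by
  rw [← Int.toNat_of_nonneg hi, ← Int.toNat_of_nonneg hj]
  rw [PySem.List.pySetD_natCast, PySem.List.pySetD_natCast, PySem.List.pySetD_natCast,
    PySem.List.pySetD_natCast, List.set_comm _ _ (by omega)]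

lemma gf2_setfold_comm (fc p0 x : Int) (hp0 : 0 ≤ p0) :
    ∀ (l : List (Int × List Int)) (v : List Int),
    (∀ c ∈ l.map Prod.fst, 0 ≤ c ∧ c ≠ p0) →
    gf2_setfold fc l (PySem.List.pySetD v p0 x)
      = PySem.List.pySetD (gf2_setfold fc l v) p0 x := by
  intro l
  induction l with
  | nil => intro v _; rfl
  | cons q t ih =>
    intro v h
    have hq := h q.1 (List.mem_map.mpr ⟨q, List.mem_cons_self, rfl⟩)
    rw [gf2_setfold_cons, gf2_setfold_cons,
      gf2_setD_comm v p0 q.1 x _ hp0 hq.1 (Ne.symm hq.2),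
      ih _ (fun c hc => h c (List.mem_cons_of_mem _ hc))]

lemma gf2_setfold_reverse (fc : Int) :
    ∀ (l : List (Int × List Int)) (v : List Int),
    (∀ c ∈ l.map Prod.fst, 0 ≤ c) → (l.map Prod.fst).Nodup →
    gf2_setfold fc l.reverse v = gf2_setfold fc l v := by
  intro l
  induction l with
  | nil => intro v _ _; rfl
  | cons q t ih =>
    intro v hpos hnd
    rw [List.map_cons] at hpos hnd
    have hq0 : 0 ≤ q.1 := hpos q.1 List.mem_cons_self
    have hqt : ∀ c ∈ t.map Prod.fst, 0 ≤ c ∧ c ≠ q.1 := by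
      intro c hc
      refine ⟨hpos c (List.mem_cons_of_mem _ hc), ?_⟩
      intro hh
      exact (List.nodup_cons.mp hnd).1 (hh ▸ hc)
    have hsplit : gf2_setfold fc ((q :: t).reverse) v
        = PySem.List.pySetD (gf2_setfold fc t.reverse v) q.1 (PySem.List.pyGetD q.2 fc 0) := by
      simp [gf2_setfold, List.foldl_append]
    rw [hsplit, ih _ (fun c hc => hpos c (List.mem_cons_of_mem _ hc)) (List.nodup_cons.mp hnd).2,
      gf2_setfold_cons, gf2_setfold_comm fc q.1 _ hq0 t _ hqt]

lemma gf2_setfold_key (fc : Int) :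
    ∀ (l1 l2 : List (Int × List Int)) (v : List Int),
    l1.map (fun q => (q.1, PySem.List.pyGetD q.2 fc 0))
      = l2.map (fun q => (q.1, PySem.List.pyGetD q.2 fc 0)) →
    gf2_setfold fc l1 v = gf2_setfold fc l2 v := by
  intro l1
  induction l1 with
  | nil =>
    intro l2 v h
    cases l2 with
    | nil => rfl
    | cons q2 t2 => exact absurd h (by simp)
  | cons q1 t1 ih =>
    intro l2 v h
    cases l2 with
    | nil => exact absurd h (by simp)
    | cons q2 t2 =>
      simp only [List.map_cons, List.cons.injEq, Prod.mk.injEq] at h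
      rw [gf2_setfold_cons, gf2_setfold_cons, h.1.1, h.1.2, ih t2 _ h.2]

lemma gf2_redE_cons (cur : List Int) (q : Int × List Int) (t : List (Int × List Int)) :
    gf2_redE cur (q :: t)
      = gf2_redE (if PySem.List.pyGetD cur q.1 0 = 1 then gf2_xorB cur q.2 else cur) t := rfl

lemma gf2_redE_len (n : Nat) :
    ∀ (l : List (Int × List Int)) (cur : List Int), n ≤ cur.length →
    (∀ q ∈ l, n ≤ q.2.length) → n ≤ (gf2_redE cur l).length := by
  intro l
  induction l with
  | nil => intro cur h _; exact h
  | cons q t ih =>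
    intro cur hc hl
    rw [gf2_redE_cons]
    by_cases hb : PySem.List.pyGetD cur q.1 0 = 1
    · rw [if_pos hb]
      exact ih _ (by rw [gf2_xorB_length]; have := hl q List.mem_cons_self; omega)
        (fun x hx => hl x (List.mem_cons_of_mem _ hx))
    · rw [if_neg hb]
      exact ih _ hc (fun x hx => hl x (List.mem_cons_of_mem _ hx))

lemma gf2_take_redE (n : Nat) :
    ∀ (l : List (Int × List Int)) (cur : List Int), n ≤ cur.length →
    (∀ q ∈ l, n ≤ q.2.length ∧ 0 ≤ q.1 ∧ q.1 < (n : Int)) →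
    (gf2_redE cur l).take n
      = gf2_redE (cur.take n) (l.map (fun q => (q.1, q.2.take n))) := by
  intro l
  induction l with
  | nil => intro cur _ _; rfl
  | cons q t ih =>
    intro cur hc hl
    obtain ⟨hql, hq0, hqn⟩ := hl q List.mem_cons_self
    rw [List.map_cons, gf2_redE_cons, gf2_redE_cons]
    simp only
    rw [← gf2_bit_take n q.1 hq0 hqn cur hc]
    by_cases hb : PySem.List.pyGetD cur q.1 0 = 1
    · rw [if_pos hb, if_pos hb, ih _ (by rw [gf2_xorB_length]; omega)
        (fun x hx => hl x (List.mem_cons_of_mem _ hx)), gf2_take_xorB n _ _ hc hql]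
    · rw [if_neg hb, if_neg hb]
      exact ih _ hc (fun x hx => hl x (List.mem_cons_of_mem _ hx))

lemma gf2_Rel_getElem : ∀ (ps : List (Int × List Int)) (ms : List (List Int)),
    gf2_Rel ps ms → ∀ (i : Nat) (hi : i < ps.length) (hi' : i < ms.length),
    ms[i] = gf2_redE (ps[i].2) (ps.drop (i + 1)) := by
  intro ps
  induction ps with
  | nil => intro ms h i hi _; exact absurd hi (by simp)
  | cons q pt ih =>
    intro ms h i hi hi'
    cases ms with
    | nil => exact absurd h (by simp [gf2_Rel])
    | cons mr mt =>
      obtain ⟨hhead, htail⟩ := h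
      cases i with
      | zero => simpa using hhead
      | succ i =>
        simp only [List.getElem_cons_succ, List.drop_succ_cons]
        exact ih mt htail i (by simpa using hi) (by simpa using hi')

lemma gf2_reduceB_map_fst (pivots : List (Int × List Int)) :
    (gf2_reduceB pivots).map Prod.fst = pivots.map Prod.fst := by
  rw [gf2_reduceB, PySem.List.foldl_append_singleton_eq_map, List.nil_append, List.map_map]
  have : (Prod.fst ∘ fun p : Int × (Int × List Int) =>
      (p.2.1, gf2_redE p.2.2 (PySem.List.slice pivots (some (p.1 + 1)) none)))
      = (fun p : Int × (Int × List Int) => p.2.1) := rfl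
  rw [this, show (fun p : Int × (Int × List Int) => p.2.1)
      = (Prod.fst ∘ fun p : Int × (Int × List Int) => p.2) from rfl,
    ← List.map_map, PySem.List.map_snd_enumerate pivots 0]

lemma gf2_reduceB_getElem (pivots : List (Int × List Int)) (i : Nat)
    (hi : i < (gf2_reduceB pivots).length) (hi' : i < pivots.length) :
    (gf2_reduceB pivots)[i] = (pivots[i].1, gf2_redE (pivots[i].2) (pivots.drop (i + 1))) := by
  have hmap : gf2_reduceB pivots = (PySem.List.enumerate pivots).map
      (fun p => (p.2.1, gf2_redE p.2.2 (PySem.List.slice pivots (some (p.1 + 1)) none))) := by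
    rw [gf2_reduceB, PySem.List.foldl_append_singleton_eq_map, List.nil_append]
  rw [List.getElem_of_eq hmap hi, List.getElem_map, PySem.List.getElem_enumerate]
  have hsl : PySem.List.slice pivots (some ((0 : Int) + (i : Nat) + 1)) none
      = pivots.drop (i + 1) := by
    rw [show (0 : Int) + (i : Nat) + 1 = (((i + 1 : Nat) : Nat) : Int) by push_cast; ring,
      PySem.List.slice_from_natCast]
  rw [hsl]

lemma gf2_vecA_eq (n : Nat) (fc : Int) (m : List (List Int)) (hm : ∀ r ∈ m, n ≤ r.length)
    (hfc0 : 0 ≤ fc) (hfcn : fc < (n : Int)) :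
    ∀ (pcs : List Int) (si : Int) (s : Nat) (v : List Int),
    si = (s : Int) → s + pcs.length ≤ m.length →
    (PySem.List.enumerate pcs si).foldl (fun v p =>
        if p.1 < PySem.List.len m then
          PySem.List.pySetD v p.2 (PySem.List.pyGetD (PySem.List.pyGetD m p.1 []) fc 0)
        else v) v
    = gf2_setfold fc (pcs.zip (((m.drop s).take pcs.length).map (fun r => r.take n))) v := by
  intro pcs
  induction pcs with
  | nil =>
    intro si s v _ _
    simp [PySem.List.enumerate_nil, gf2_setfold]
  | cons pc pt ih =>
    intro si s v hsi hs
    subst hsi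
    have hsm : s < m.length := by
      simp only [List.length_cons] at hs
      omega
    rw [PySem.List.enumerate_cons, List.foldl_cons,
      if_pos (by
        rw [PySem.List.len_eq]
        show ((s : Nat) : Int) < ((m.length : Nat) : Int)
        exact_mod_cast hsm)]
    have hget : PySem.List.pyGetD m ((s : Nat) : Int) [] = m[s] := by
      rw [PySem.List.pyGetD_natCast, List.getD_eq_getElem _ _ hsm]
    rw [hget, gf2_bit_take n fc hfc0 hfcn m[s] (hm _ (List.getElem_mem _))]
    have hdrop : m.drop s = m[s] :: m.drop (s + 1) := List.drop_eq_getElem_cons hsm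
    rw [show List.take (pc :: pt).length (m.drop s)
        = m[s] :: (m.drop (s + 1)).take pt.length by rw [hdrop, List.length_cons, List.take_succ_cons],
      List.map_cons, List.zip_cons_cons, gf2_setfold_cons]
    exact ih ((s : Int) + 1) (s + 1) _ (by push_cast; ring)
      (by simp only [List.length_cons] at hs; omega)

lemma gf2_vec_eq (n rows : Nat) (m : List (List Int)) (pivots : List (Int × List Int))
    (rest : List (List Int)) (fc : Int)
    (hI : gf2_Inv n rows n m ((pivots.length : Nat) : Int) (pivots.map Prod.fst) pivots rest)
    (hfc0 : 0 ≤ fc) (hfcn : fc < (n : Int)) (_hfree : fc ∉ pivots.map Prod.fst) :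
    gf2_vecA m n (pivots.map Prod.fst) fc = gf2_vecB n (gf2_reduceB pivots) fc := by
  obtain ⟨h1, h2, -, -, hC, h5, h6, h7, h8, h9, hR⟩ := hI
  have hrankle : pivots.length ≤ m.length := by omega
  rw [gf2_vecA,
    gf2_vecA_eq n fc m (fun r hr => by have := h2 r hr; omega) hfc0 hfcn
      (pivots.map Prod.fst) 0 0 _ (by simp) (by simp; omega),
    gf2_vecB,
    show (gf2_reduceB pivots).reverse.foldl
        (fun vec q => PySem.List.pySetD vec q.1 (PySem.List.pyGetD q.2 fc 0))
        (PySem.List.pySetD (List.replicate n (0 : Int)) fc 1)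
      = gf2_setfold fc (gf2_reduceB pivots).reverse
        (PySem.List.pySetD (List.replicate n (0 : Int)) fc 1) from rfl,
    gf2_setfold_reverse fc _ _
      (by
        rw [gf2_reduceB_map_fst]
        intro c hc
        exact (h7 c hc).1)
      (by
        rw [gf2_reduceB_map_fst]
        exact h6.imp ne_of_lt),
    List.drop_zero, List.length_map]
  apply gf2_setfold_key
  have hredlen : (gf2_reduceB pivots).length = pivots.length := by
    rw [gf2_reduceB, PySem.List.foldl_append_singleton_eq_map, List.nil_append,
      List.length_map, PySem.List.length_enumerate]
  apply List.ext_getElem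
  · simp only [List.length_map, List.length_zip, List.length_take, hredlen]
    omega
  · intro i hi1 hi2
    have hip : i < pivots.length := by
      simpa [hredlen] using hi2
    have hiz : i < ((pivots.map Prod.fst).zip ((m.take pivots.length).map (fun r => r.take n))).length := by
      simpa using hi1
    simp only [List.getElem_map]
    rw [List.getElem_zip, gf2_reduceB_getElem pivots i (by omega) hip]
    have hmtop : ((m.take pivots.length).map (fun r => r.take n))[i]'(by
        simp only [List.length_map, List.length_take]; omega)
        = gf2_redE (pivots[i].2.take n) ((pivots.drop (i + 1)).map (fun q => (q.1, q.2.take n))) := by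
      have := gf2_Rel_getElem (pivots.map (fun q => (q.1, q.2.take n)))
        ((m.take pivots.length).map (fun r => r.take n)) hR i (by simpa using hip)
        (by simp only [List.length_map, List.length_take]; omega)
      rw [this, List.getElem_map, ← List.map_drop]
    have hdh : ∀ q ∈ pivots.drop (i + 1), n ≤ q.2.length ∧ 0 ≤ q.1 ∧ q.1 < (n : Int) := by
      intro q hq
      have hqm := List.mem_of_mem_drop hq
      have hb := h7 q.1 (List.mem_map.mpr ⟨q, hqm, rfl⟩)
      exact ⟨h8 q hqm, hb.1, hb.2⟩
    have hculen : n ≤ pivots[i].2.length := h8 _ (List.getElem_mem hip)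
    have hrlen : n ≤ (gf2_redE (pivots[i].2) (pivots.drop (i + 1))).length :=
      gf2_redE_len n _ _ hculen (fun q hq => (hdh q hq).1)
    simp only [Prod.mk.injEq]
    constructor
    · rw [List.getElem_map]
    · rw [hmtop, ← gf2_take_redE n _ _ hculen hdh,
        ← gf2_bit_take n fc hfc0 hfcn _ hrlen]

theorem gf2_kernel_spec : Claim_equal_gf2_kernel := by
  unfold Claim_equal_gf2_kernel
  intro matrix _hDom hPre
  have hPre1 := hPre
  unfold Spec_gf2_kernel
  by_cases hdeg : matrix = [] ∨ matrix.headD [] = []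
  · rw [gf2_kernel, gf2_kernel_alt, if_pos hdeg, if_pos hdeg]
  · rw [not_or] at hdeg
    obtain ⟨hne, hhd⟩ := hdeg
    set n := (matrix.headD []).length with hn
    set rows := matrix.length with hrows
    have hdeg' : ¬ (matrix = [] ∨ matrix.headD [] = []) := by tauto
    rw [gf2_kernel, gf2_kernel_alt, if_neg hdeg', if_neg hdeg']
    simp only [← hn]
    obtain ⟨r0, rs, hm⟩ := List.exists_cons_of_ne_nil hne
    have hr0 : r0.length = n := by
      rw [hn, hm, List.headD_cons]
    have hm0ne : (PySem.List.enumerate matrix).map (gf2_augRow (n : Int)) ≠ [] := by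
      rw [hm, PySem.List.enumerate_cons]
      simp
    have hrc : PySem.List.len ((PySem.List.enumerate matrix).map (gf2_augRow (n : Int)))
        = ((rows : Nat) : Int) := by
      rw [PySem.List.len_eq]
      simp [PySem.List.length_enumerate, hrows]
    have hct : (if (PySem.List.enumerate matrix).map (gf2_augRow (n : Int)) = [] then (0 : Int)
        else PySem.List.len (((PySem.List.enumerate matrix).map (gf2_augRow (n : Int))).headD []))
        = 2 * (n : Int) := by
      rw [if_neg hm0ne, hm, PySem.List.enumerate_cons, List.map_cons, List.headD_cons,
        PySem.List.len_eq]
      simp only [gf2_augRow, List.length_append, List.length_map, PySem.List.length_pyRange_one]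
      push_cast [hr0]
      omega
    rw [hrc, hct]
    have htakeaug : ∀ p ∈ PySem.List.enumerate matrix, (gf2_augRow (n : Int) p).take n = p.2.take n := by
      intro p hp
      obtain ⟨k, hkm, rfl⟩ := (PySem.List.mem_enumerate_iff _ _ _).mp hp
      have hlen : n ≤ matrix[k].length := hPre1 _ (List.getElem_mem hkm)
      simp only [gf2_augRow]
      rw [List.take_append_of_le_length hlen]
    have hInv0 : gf2_Inv n rows 0 ((PySem.List.enumerate matrix).map (gf2_augRow (n : Int)))
        0 [] [] matrix := by
      refine ⟨?_, ?_, by simp, rfl, by simp [hrows], ?_, by simp, by simp, by simp, ?_, ?_⟩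
      · simp [PySem.List.length_enumerate, hrows]
      · intro r hr
        obtain ⟨p, hp, rfl⟩ := List.mem_map.mp hr
        obtain ⟨k, hkm, rfl⟩ := (PySem.List.mem_enumerate_iff _ _ _).mp hp
        have hlen : n ≤ matrix[k].length := hPre1 _ (List.getElem_mem hkm)
        simp only [gf2_augRow, List.length_append, List.length_map, PySem.List.length_pyRange_one]
        omega
      · simp only [List.length_nil, List.drop_zero]
        rw [List.map_map]
        calc (PySem.List.enumerate matrix).map ((fun r => List.take n r) ∘ gf2_augRow (n : Int))
            = (PySem.List.enumerate matrix).map ((fun r => List.take n r) ∘ (fun p => p.2)) := by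
              apply List.map_congr_left
              intro p hp
              simp only [Function.comp_apply]
              exact htakeaug p hp
          _ = matrix.map (fun r => List.take n r) := by
              rw [← List.map_map]
              rw [PySem.List.map_snd_enumerate matrix 0]
      · intro r hr
        exact hPre1 r hr
      · simp only [List.length_nil, List.take_zero, List.map_nil]
        trivial
    have hfold := gf2_fold_inv n rows n 0
      (((PySem.List.enumerate matrix).map (gf2_augRow (n : Int))), 0, []) ([], matrix)
      (by omega) (by simp) hInv0
    rcases hres : (PySem.List.pyRange 0 (n : Int) 1).foldl
        (gf2_stepA ((rows : Nat) : Int) (2 * (n : Int)))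
        (((PySem.List.enumerate matrix).map (gf2_augRow (n : Int))), 0, []) with ⟨mF, rankF, pcsF⟩
    rcases hresB : (PySem.List.pyRange 0 (n : Int) 1).foldl gf2_stepB ([], matrix) with ⟨pivots, rest⟩
    rw [hres, hresB] at hfold
    obtain ⟨h1, h2, h3, h4, hC, h5, h6, h7, h8, h9, hR⟩ := hfold
    simp only at h1 h2 h3 h4 hC h5 h6 h7 h8 h9 hR
    subst h3; subst h4
    have hIfin : gf2_Inv n rows n mF ((pivots.length : Nat) : Int) (pivots.map Prod.fst)
        pivots rest := ⟨h1, h2, rfl, rfl, hC, h5, h6, h7, h8, h9, hR⟩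
    simp only
    rw [PySem.List.foldl_append_singleton_eq_map, List.nil_append]
    have hbodyB : (fun (acc : List (List Int)) (fc : Int) =>
        if PySem.Set.contains (PySem.Set.ofList (pivots.map Prod.fst)) fc then acc
        else acc ++ [gf2_vecB n (gf2_reduceB pivots) fc])
        = (fun acc fc => if (!((pivots.map Prod.fst).contains fc)) = true
            then acc ++ [gf2_vecB n (gf2_reduceB pivots) fc] else acc) := by
      funext acc fc
      have hcc : PySem.Set.contains (PySem.Set.ofList (pivots.map Prod.fst)) fc
          = (pivots.map Prod.fst).contains fc := by
        rw [Bool.eq_iff_iff, PySem.Set.contains_iff, PySem.Set.mem_ofList,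
          List.contains_iff_mem]
      rw [hcc]
      by_cases h : (pivots.map Prod.fst).contains fc = true
      · rw [if_pos h, if_neg (by rw [h]; simp)]
      · rw [Bool.not_eq_true] at h
        rw [if_neg (by rw [h]; simp), if_pos (by rw [h]; rfl)]
    rw [hbodyB, PySem.List.foldl_append_if, List.nil_append]
    apply List.map_congr_left
    intro fc hfc
    rw [List.mem_filter] at hfc
    obtain ⟨hfcr, hfcf⟩ := hfc
    rw [PySem.List.mem_pyRange_one] at hfcr
    have hfree : fc ∉ pivots.map Prod.fst := by simpa using hfcf
    exact gf2_vec_eq n rows mF pivots rest fc hIfin hfcr.1 hfcr.2 hfree
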